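-- pv_equiv track=rewrite | github.com/dhleekr/algorithm | 22/21611.py | boom
-- ===== SOURCE A (Python) =====
-- def boom(line):
--     i = 0
--     temp = []
--     while i < len(line):
--         num = line[i]
--         cnt = 1
--         while i + cnt < len(line) and line[i + cnt] == num:
--             cnt += 1
--         if cnt >= 4:
--             for j in range(cnt):
--                 temp.append(i + j)
--         i += cnt
--     score = 0
--     for i in reversed(temp):
--         num = line.pop(i)
--         score += num
--     return line, score
-- ===== SOURCE B (Python) =====
-- def boom(line):
--     out = []
--     score = 0
--     run_val = 0
--     run_len = 0
--     for x in line: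
--         if run_len > 0 and x == run_val:
--             run_len += 1
--         else:
--             if run_len >= 4:
--                 score += run_val * run_len
--             else:
--                 out.extend([run_val] * run_len)
--             run_val = x
--             run_len = 1
--     if run_len >= 4:
--         score += run_val * run_len
--     else:
--         out.extend([run_val] * run_len)
--     return out, score
-- ===== Notes on version B (the rewrite author's own statement) =====
-- stated objective: faster
-- what changed: A scans runs by index arithmetic, collects the indices of every run of length >= 4, then pops them one by one from the list (each pop shifts the tail); B is a single forward pass that maintains the current run and either flushes it to the kept output or adds its sum to the score, never touching indices.
import Mathlib
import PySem

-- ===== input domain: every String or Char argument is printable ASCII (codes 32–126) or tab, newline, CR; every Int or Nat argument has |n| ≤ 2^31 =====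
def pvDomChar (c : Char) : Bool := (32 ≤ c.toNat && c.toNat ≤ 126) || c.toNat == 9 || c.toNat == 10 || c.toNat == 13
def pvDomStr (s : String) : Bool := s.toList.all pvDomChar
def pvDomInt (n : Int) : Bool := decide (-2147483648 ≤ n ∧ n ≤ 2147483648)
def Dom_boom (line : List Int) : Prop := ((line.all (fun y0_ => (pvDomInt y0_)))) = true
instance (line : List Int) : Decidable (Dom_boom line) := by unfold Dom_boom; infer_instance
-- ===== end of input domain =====

-- B replaces A's index-run scan + index-pop phase by one forward pass over the elements
-- that keeps the current run and flushes it (objective: faster).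
-- Note: Python A mutates its argument in place (pop); the equivalence proved here is
-- about the RETURN value only (B returns a fresh list of the same value).

-- ===== PORT A =====
-- inner while: while i + cnt < len(line) and line[i + cnt] == num: cnt += 1
-- (fuel = line.length bounds the loop; it is never exhausted before the Python loop exits)
def boomInner (line : List Int) (num : Int) (i cnt fuel : Nat) : Nat :=
  match fuel with
  | 0 => cnt
  | fuel + 1 =>
    if i + cnt < line.length ∧ PySem.List.pyGetD line ((i + cnt : Nat) : Int) 0 = num then
      boomInner line num i (cnt + 1) fuel
    else cnt

-- outer while over i, accumulating temp (the indices of runs of length ≥ 4)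
def boomOuter (line : List Int) (i : Nat) (temp : List Nat) (fuel : Nat) : List Nat :=
  match fuel with
  | 0 => temp
  | fuel + 1 =>
    if i < line.length then
      boomOuter line (i + boomInner line (PySem.List.pyGetD line (i : Int) 0) i 1 line.length)
        (if 4 ≤ boomInner line (PySem.List.pyGetD line (i : Int) 0) i 1 line.length then
          temp ++ (List.range (boomInner line (PySem.List.pyGetD line (i : Int) 0) i 1 line.length)).map
            (fun j => i + j)
        else temp) fuel
    else temp

-- one step of the pop loop: num = line.pop(i); score += num
-- (the indices are always in range here, so the none branch is never taken)
def boomPop (st : List Int × Int) (idx : Nat) : List Int × Int :=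
  match PySem.List.pop? st.1 (idx : Int) with
  | some (num, rest) => (rest, st.2 + num)
  | none => st

def boom (line : List Int) : List Int × Int :=
  (boomOuter line 0 [] line.length).reverse.foldl boomPop (line, 0)

-- ===== PORT B =====
def boomAltStep (st : List Int × Int × Int × Nat) (x : Int) : List Int × Int × Int × Nat :=
  match st with
  | (out, score, runVal, runLen) =>
    if 0 < runLen ∧ x = runVal then (out, score, runVal, runLen + 1)
    else if 4 ≤ runLen then (out, score + runVal * (runLen : Int), x, 1)
    else (out ++ List.replicate runLen runVal, score, x, 1)

def boomAltFinish (st : List Int × Int × Int × Nat) : List Int × Int :=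
  match st with
  | (out, score, runVal, runLen) =>
    if 4 ≤ runLen then (out, score + runVal * (runLen : Int))
    else (out ++ List.replicate runLen runVal, score)

def boom_alt (line : List Int) : List Int × Int :=
  boomAltFinish (line.foldl boomAltStep ([], 0, 0, 0))

-- ===== PRECONDITION & SPEC =====
def Spec_boom (line : List Int) (out : List Int × Int) : Prop := out = boom_alt line
instance (line : List Int) (out : List Int × Int) : Decidable (Spec_boom line out) := by unfold Spec_boom; infer_instance

-- ===== CLAIM (what is proved, stated in full; the proofs are below) =====
def Claim_equal_boom : Prop := ∀ (line : List Int), Dom_boom line → Spec_boom line (boom line)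

-- ===== LEMMAS AND PROOFS =====

-- count of leading elements equal to v
def pvCl (v : Int) : List Int → Nat
  | [] => 0
  | x :: xs => if x = v then pvCl v xs + 1 else 0

theorem pvCl_nil (v : Int) : pvCl v [] = 0 := rfl

theorem pvCl_cons (v x : Int) (xs : List Int) :
    pvCl v (x :: xs) = if x = v then pvCl v xs + 1 else 0 := rfl

-- common reference function: remove runs of length ≥ 4, sum what is removed
def pvF : List Int → List Int × Int
  | [] => ([], 0)
  | x :: xs =>
    let c := pvCl x xs + 1
    let r := pvF (xs.drop (c - 1))
    if 4 ≤ c then (r.1, x * (c : Int) + r.2)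
    else (List.replicate c x ++ r.1, r.2)
termination_by l => l.length
decreasing_by simp

theorem pvF_nil : pvF [] = ([], 0) := by simp [pvF]

theorem pvF_cons (x : Int) (xs : List Int) : pvF (x :: xs) =
    (if 4 ≤ pvCl x xs + 1 then
      ((pvF (xs.drop (pvCl x xs))).1,
        x * ((pvCl x xs : Int) + 1) + (pvF (xs.drop (pvCl x xs))).2)
     else (List.replicate (pvCl x xs + 1) x ++ (pvF (xs.drop (pvCl x xs))).1,
        (pvF (xs.drop (pvCl x xs))).2)) := by
  rw [pvF]
  norm_num

theorem pvCl_le_length (v : Int) (xs : List Int) : pvCl v xs ≤ xs.length := by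
  induction xs with
  | nil => simp [pvCl]
  | cons x xs ih => by_cases h : x = v <;> simp [pvCl, h] <;> omega

theorem pvCl_replicate (v : Int) (j : Nat) : pvCl v (List.replicate j v) = j := by
  induction j with
  | zero => simp [pvCl]
  | succ j ih => simp [List.replicate_succ, pvCl, ih]

theorem pvCl_replicate_append (v x : Int) (xs : List Int) (hx : x ≠ v) (j : Nat) :
    pvCl v (List.replicate j v ++ x :: xs) = j := by
  induction j with
  | zero => simp [pvCl, hx]
  | succ j ih => simp [List.replicate_succ, pvCl, ih]

theorem pvCl_decomp (v : Int) (xs : List Int) :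
    xs = List.replicate (pvCl v xs) v ++ xs.drop (pvCl v xs) := by
  induction xs with
  | nil => simp [pvCl_nil]
  | cons x xs ih =>
    by_cases h : x = v
    · subst h
      simp only [pvCl, if_pos rfl, List.replicate_succ, List.cons_append, List.drop_succ_cons]
      exact congrArg (x :: ·) ih
    · simp [pvCl, h]

theorem pvF_replicate (v : Int) (k : Nat) (hk : 1 ≤ k) :
    pvF (List.replicate k v) =
      if 4 ≤ k then ([], v * (k : Int)) else (List.replicate k v, 0) := by
  obtain ⟨j, rfl⟩ : ∃ j, k = j + 1 := ⟨k - 1, by omega⟩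
  rw [List.replicate_succ, pvF_cons, pvCl_replicate]
  by_cases h4 : 4 ≤ j + 1
  · rw [if_pos h4, if_pos h4]
    simp [List.drop_replicate, pvF_nil]
  · rw [if_neg h4, if_neg h4]
    simp [List.drop_replicate, pvF_nil, List.replicate_succ]

theorem pvF_replicate_cons (v x : Int) (xs : List Int) (k : Nat) (hk : 1 ≤ k) (hx : x ≠ v) :
    pvF (List.replicate k v ++ x :: xs) =
      if 4 ≤ k then ((pvF (x :: xs)).1, v * (k : Int) + (pvF (x :: xs)).2)
      else (List.replicate k v ++ (pvF (x :: xs)).1, (pvF (x :: xs)).2) := by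
  obtain ⟨j, rfl⟩ : ∃ j, k = j + 1 := ⟨k - 1, by omega⟩
  rw [List.replicate_succ, List.cons_append, pvF_cons, pvCl_replicate_append v x xs hx j,
    List.drop_left' (List.length_replicate)]
  by_cases h4 : 4 ≤ j + 1
  · rw [if_pos h4, if_pos h4]
    push_cast
    ring_nf
  · rw [if_neg h4, if_neg h4, List.replicate_succ, List.cons_append]

-- ===== B equals pvF =====

theorem altMain (xs : List Int) : ∀ (out : List Int) (score v : Int) (k : Nat), 1 ≤ k →
    boomAltFinish (xs.foldl boomAltStep (out, score, v, k)) =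
      (out ++ (pvF (List.replicate k v ++ xs)).1,
       score + (pvF (List.replicate k v ++ xs)).2) := by
  induction xs with
  | nil =>
    intro out score v k hk
    simp only [List.foldl_nil, List.append_nil, boomAltFinish, pvF_replicate v k hk]
    split <;> simp
  | cons x xs ih =>
    intro out score v k hk
    by_cases hx : x = v
    · subst hx
      rw [List.foldl_cons, boomAltStep, if_pos ⟨hk, rfl⟩, ih out score x (k + 1) (by omega)]
      have hrep : List.replicate k x ++ x :: xs = List.replicate (k + 1) x ++ xs := by
        rw [List.replicate_succ']
        simp
      rw [hrep]
    · rw [List.foldl_cons, boomAltStep, if_neg (by simp [hx]),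
        pvF_replicate_cons v x xs k hk hx]
      by_cases h4 : 4 ≤ k
      · rw [if_pos h4, if_pos h4, ih out (score + v * (k : Int)) x 1 (by omega)]
        simp [add_assoc]
      · rw [if_neg h4, if_neg h4, ih (out ++ List.replicate k v) score x 1 (by omega)]
        simp

theorem alt_eq_pvF (line : List Int) : boom_alt line = pvF line := by
  cases line with
  | nil => simp [boom_alt, boomAltFinish, pvF_nil]
  | cons x xs =>
    rw [boom_alt, List.foldl_cons, boomAltStep, if_neg (by simp), if_neg (by omega),
      altMain xs _ _ x 1 (le_refl 1)]
    simp

-- ===== A equals pvF =====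

theorem drop_eq_getD_cons (l : List Int) (i : Nat) (h : i < l.length) :
    l.drop i = l.getD i 0 :: l.drop (i + 1) := by
  rw [List.getD_eq_getElem l 0 h]
  exact List.drop_eq_getElem_cons h

theorem inner_eq (line : List Int) (num : Int) (i : Nat) :
    ∀ (fuel cnt : Nat), line.length ≤ i + cnt + fuel →
      boomInner line num i cnt fuel = cnt + pvCl num (line.drop (i + cnt)) := by
  intro fuel
  induction fuel with
  | zero =>
    intro cnt hb
    rw [List.drop_eq_nil_of_le (by omega), pvCl_nil, boomInner]
    omega
  | succ fuel ih =>
    intro cnt hb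
    rw [boomInner]
    by_cases hc : i + cnt < line.length ∧ PySem.List.pyGetD line ((i + cnt : Nat) : Int) 0 = num
    · rw [if_pos hc, ih (cnt + 1) (by omega)]
      have hget : line.getD (i + cnt) 0 = num := by
        have h2 := hc.2
        rwa [PySem.List.pyGetD_natCast] at h2
      have hidx : i + (cnt + 1) = i + cnt + 1 := by omega
      rw [hidx, drop_eq_getD_cons line (i + cnt) hc.1, pvCl_cons, hget, if_pos rfl]
      omega
    · rw [if_neg hc]
      by_cases hl : i + cnt < line.length
      · have hne : line.getD (i + cnt) 0 ≠ num := fun he =>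
          hc ⟨hl, by rw [PySem.List.pyGetD_natCast]; exact he⟩
        rw [drop_eq_getD_cons line (i + cnt) hl, pvCl_cons, if_neg hne]
        try rfl
      · rw [List.drop_eq_nil_of_le (by omega), pvCl_nil]
        try rfl

theorem boomOuter_append (line : List Int) :
    ∀ (fuel i : Nat) (temp : List Nat),
      boomOuter line i temp fuel = temp ++ boomOuter line i [] fuel := by
  intro fuel
  induction fuel with
  | zero =>
    intro i temp
    simp [boomOuter]
  | succ fuel ih =>
    intro i temp
    rw [boomOuter]
    conv_rhs => rw [boomOuter]
    by_cases h : i < line.length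
    · rw [if_pos h, if_pos h]
      set cnt := boomInner line (PySem.List.pyGetD line (i : Int) 0) i 1 line.length with hcnt
      by_cases h4 : 4 ≤ cnt
      · rw [if_pos h4, if_pos h4,
          ih (i + cnt) (temp ++ (List.range cnt).map (fun j => i + j)),
          ih (i + cnt) ([] ++ (List.range cnt).map (fun j => i + j))]
        simp
      · rw [if_neg h4, if_neg h4, ih (i + cnt) temp]
    · rw [if_neg h, if_neg h]
      simp

theorem boomOuter_step (line : List Int) (i fuel : Nat) (h : i < line.length) :
    boomOuter line i [] (fuel + 1) =
      (if 4 ≤ pvCl (line.getD i 0) (line.drop (i + 1)) + 1 then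
        (List.range (pvCl (line.getD i 0) (line.drop (i + 1)) + 1)).map (fun j => i + j)
      else []) ++ boomOuter line (i + (pvCl (line.getD i 0) (line.drop (i + 1)) + 1)) [] fuel := by
  have hc : boomInner line (PySem.List.pyGetD line (i : Int) 0) i 1 line.length =
      pvCl (line.getD i 0) (line.drop (i + 1)) + 1 := by
    rw [inner_eq line (PySem.List.pyGetD line (i : Int) 0) i line.length 1 (by omega),
      PySem.List.pyGetD_natCast]
    omega
  rw [boomOuter, if_pos h, hc, boomOuter_append line fuel]
  by_cases h4 : 4 ≤ pvCl (line.getD i 0) (line.drop (i + 1)) + 1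
  · rw [if_pos h4, if_pos h4]
    simp
  · rw [if_neg h4, if_neg h4]

theorem eraseIdx_join (A : List Int) (x : Int) (B : List Int) :
    (A ++ x :: B).eraseIdx A.length = A ++ B := by
  induction A with
  | nil => rfl
  | cons a A ih => simp [List.eraseIdx_cons_succ, ih]

-- popping one element at a known join point
theorem boomPop_join (A B : List Int) (x : Int) (s : Int) :
    boomPop (A ++ x :: B, s) A.length = (A ++ B, s + x) := by
  have hlen : A.length < (A ++ x :: B).length := by simp
  have hpop : PySem.List.pop? (A ++ x :: B) ((A.length : Nat) : Int) = some (x, A ++ B) := by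
    rw [PySem.List.pop?_natCast (A ++ x :: B) A.length hlen]
    simp [List.getElem_append_right (le_refl A.length), eraseIdx_join]
  simp [boomPop, hpop]

-- popping a whole run (indices pre.length + c - 1 down to pre.length)
theorem pop_run (num : Int) : ∀ (c : Nat) (pre R : List Int) (s : Int),
    ((List.range c).map (fun j => pre.length + j)).reverse.foldl boomPop
        (pre ++ List.replicate c num ++ R, s)
      = (pre ++ R, s + num * (c : Int)) := by
  intro c
  induction c with
  | zero =>
    intro pre R s
    simp
  | succ c ih =>
    intro pre R s
    rw [List.range_succ, List.map_append, List.reverse_append]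
    simp only [List.map_cons, List.map_nil, List.reverse_cons, List.reverse_nil,
      List.nil_append, List.singleton_append, List.foldl_cons]
    have hsplit : pre ++ List.replicate (c + 1) num ++ R =
        (pre ++ List.replicate c num) ++ num :: R := by
      rw [List.replicate_succ']
      simp
    have hlen : (pre ++ List.replicate c num).length = pre.length + c := by simp
    rw [hsplit, ← hlen, boomPop_join (pre ++ List.replicate c num) R num s,
      ih pre R (s + num)]
    simp only [Prod.mk.injEq, true_and]
    push_cast
    ring

theorem mainA (line : List Int) : ∀ (fuel i : Nat), line.length ≤ i + fuel → i ≤ line.length →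
    (boomOuter line i [] fuel).reverse.foldl boomPop (line, 0)
      = (line.take i ++ (pvF (line.drop i)).1, (pvF (line.drop i)).2) := by
  intro fuel
  induction fuel with
  | zero =>
    intro i h1 h2
    have hi : i = line.length := by omega
    subst hi
    rw [boomOuter]
    simp [pvF_nil]
  | succ fuel ih =>
    intro i h1 h2
    by_cases h : i < line.length
    · have hkle : pvCl (line.getD i 0) (line.drop (i + 1)) ≤ line.length - (i + 1) := by
        have := pvCl_le_length (line.getD i 0) (line.drop (i + 1))
        rwa [List.length_drop] at this
      have hIH := ih (i + (pvCl (line.getD i 0) (line.drop (i + 1)) + 1))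
        (by omega) (by omega)
      rw [boomOuter_step line i fuel h, List.reverse_append, List.foldl_append, hIH]
      set k := pvCl (line.getD i 0) (line.drop (i + 1)) with hk
      have hdropi : line.drop i =
          List.replicate (k + 1) (line.getD i 0) ++ line.drop (i + (k + 1)) := by
        conv_lhs => rw [drop_eq_getD_cons line i h]
        conv_lhs => rw [pvCl_decomp (line.getD i 0) (line.drop (i + 1))]
        rw [← hk, List.drop_drop, List.replicate_succ, List.cons_append]
        have hidx : i + 1 + k = i + (k + 1) := by omega
        rw [hidx]
      have htake : line.take (i + (k + 1)) =
          line.take i ++ List.replicate (k + 1) (line.getD i 0) := by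
        rw [List.take_add]
        conv_lhs => rw [hdropi]
        rw [List.take_left' (List.length_replicate)]
      have hF : pvF (line.drop i) =
          if 4 ≤ k + 1 then
            ((pvF (line.drop (i + (k + 1)))).1,
              (line.getD i 0) * ((k : Int) + 1) + (pvF (line.drop (i + (k + 1)))).2)
          else (List.replicate (k + 1) (line.getD i 0) ++ (pvF (line.drop (i + (k + 1)))).1,
              (pvF (line.drop (i + (k + 1)))).2) := by
        conv_lhs => rw [drop_eq_getD_cons line i h]
        rw [pvF_cons, ← hk, List.drop_drop]
        have hidx : i + 1 + k = i + (k + 1) := by omega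
        rw [hidx]
      by_cases h4 : 4 ≤ k + 1
      · rw [if_pos h4] at hF ⊢
        have hpre : (line.take i).length = i := by
          rw [List.length_take]
          omega
        have hrun := pop_run (line.getD i 0) (k + 1) (line.take i)
          ((pvF (line.drop (i + (k + 1)))).1) ((pvF (line.drop (i + (k + 1)))).2)
        rw [hpre] at hrun
        rw [htake, hrun, hF]
        simp only [Prod.mk.injEq, true_and]
        push_cast
        ring
      · rw [if_neg h4] at hF ⊢
        rw [hF, htake]
        simp
    · have hi : i = line.length := by omega
      subst hi
      rw [boomOuter, if_neg (by omega)]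
      simp [pvF_nil]

theorem boom_eq_pvF (line : List Int) : boom line = pvF line := by
  have h := mainA line line.length 0 (by omega) (by omega)
  simpa [boom] using h

-- ===== VERDICT (by name: the statement is the Claim_ definition above) =====
theorem boom_spec : Claim_equal_boom := by
  intro line _
  unfold Spec_boom
  rw [boom_eq_pvF, alt_eq_pvF]
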